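-- pv_equiv track=rewrite | github.com/jayantsolanki/EPIJudgePython | epi_judge_python/6-04-replace_and_remove.py | telex_encoding
-- ===== SOURCE A (Python) =====
-- from typing import List
--
-- def telex_encoding(size: int, C: List[str]):
--     punctuation = {
--         ',': 'COMMA',
--         '?': "QUESTION MARK",
--         "." : "DOT",
--         "!" : "EXCLAMATION MARK"
--     }
--
--     #lets count those punctuations to be replaced and overall size the array will be inflated to
--     final_size = 0
--     for i in C[:size]:
--         if i in punctuation: # or ['.', ',', '?', '!']
--             final_size += len(punctuation[i])
--         else:
--             final_size += 1
--     write_idx = final_size - 1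
--     curr_idx = size - 1
--     #lets start scanning for replacement, but from right
--     while curr_idx >= 0:
--         if C[curr_idx] in punctuation:
--             length = len(punctuation[C[curr_idx]])
--             C[write_idx - (length - 1):write_idx + 1] = punctuation[C[curr_idx]]
--             write_idx -= length
--         else:
--             C[write_idx] = C[curr_idx]
--             write_idx -= 1
--         curr_idx -= 1
--     return (C)
-- ===== SOURCE B (Python) =====
-- from typing import List
--
-- def telex_encoding(size: int, C: List[str]):
--     words = {
--         ',': 'COMMA',
--         '?': "QUESTION MARK",
--         ".": "DOT",
--         "!": "EXCLAMATION MARK"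
--     }
--     out = []
--     for i in range(size):
--         ch = C[i]
--         if ch in words:
--             out.extend(words[ch])
--         else:
--             out.append(ch)
--     C[:len(out)] = out
--     return C
-- ===== Notes on version B (the rewrite author's own statement) =====
-- stated objective: simpler
-- what changed: Replaces A's two-phase scheme (a counting pass to find the final size, then a right-to-left in-place write with write-index arithmetic and per-element slice assignments) by one forward pass that builds the expansion list and a single bounded slice write-back.
import Mathlib
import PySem

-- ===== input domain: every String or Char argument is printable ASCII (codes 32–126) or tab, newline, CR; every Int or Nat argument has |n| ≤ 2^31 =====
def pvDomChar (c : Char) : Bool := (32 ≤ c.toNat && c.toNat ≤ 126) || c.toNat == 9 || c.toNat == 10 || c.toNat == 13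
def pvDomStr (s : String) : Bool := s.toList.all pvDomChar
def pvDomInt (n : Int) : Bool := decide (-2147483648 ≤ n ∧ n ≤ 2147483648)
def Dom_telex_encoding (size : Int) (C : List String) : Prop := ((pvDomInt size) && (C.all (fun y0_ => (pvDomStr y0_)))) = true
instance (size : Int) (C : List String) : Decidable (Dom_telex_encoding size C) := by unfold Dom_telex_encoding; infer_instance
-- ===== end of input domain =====

-- B replaces A's count-pass + right-to-left in-place slice writes by one forward pass building the
-- expansion and a single bounded write-back (simpler). Both Pythons mutate C in place identically on
-- Pre_; the theorems are about the returned list.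

-- ===== PORT A =====
-- the `punctuation` dict literal of A
def pvPunctA : PySem.Dict String String :=
  PySem.Dict.ofList [(",", "COMMA"), ("?", "QUESTION MARK"), (".", "DOT"), ("!", "EXCLAMATION MARK")]

-- the characters of a Python str as a list of 1-char strs (what list-slice assignment from a str writes)
def pvStrChars (w : String) : List String := w.toList.map (fun c => String.mk [c])

-- Python list slice assignment l[a:b] = r; exact for 0 ≤ a ≤ b (the only indices A's loop reaches under Pre_)
def pvSliceAssignA (l : List String) (a b : Int) (r : List String) : List String :=
  let n : Int := l.length
  let a' := (min (max a 0) n).toNat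
  let b' := max (min (max b 0) n).toNat a'
  l.take a' ++ r ++ l.drop b'

-- A's while loop, right to left; fuel i+1 means curr_idx = i (the loop runs size.toNat times)
def pvLoopA (fuel : Nat) (lst : List String) (w : Int) : List String :=
  match fuel with
  | 0 => lst
  | i + 1 =>
    let c := PySem.List.pyGetD lst (i : Int) ""   -- C[curr_idx]; Python raises when i ≥ len(C) (outside Pre_)
    match pvPunctA.get? c with
    | some word =>
      let len : Int := PySem.Str.len word
      pvLoopA i (pvSliceAssignA lst (w - (len - 1)) (w + 1) (pvStrChars word)) (w - len)
    | none =>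
      pvLoopA i (PySem.List.pySetD lst w c) (w - 1)  -- C[write_idx] = c; pySetD total stand-in, exact under Pre_

def telex_encoding (size : Int) (C : List String) : List String :=
  let final_size : Int :=
    (PySem.List.slice C none (some size)).foldl
      (fun acc i =>
        if pvPunctA.contains i then acc + PySem.Str.len (pvPunctA.getD i "") else acc + 1) 0
  pvLoopA size.toNat C (final_size - 1)

-- ===== PORT B =====
-- the `words` dict literal of B
def pvWordsB : PySem.Dict String String :=
  PySem.Dict.ofList [(",", "COMMA"), ("?", "QUESTION MARK"), (".", "DOT"), ("!", "EXCLAMATION MARK")]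

def telex_encoding_alt (size : Int) (C : List String) : List String :=
  let out :=
    (PySem.List.pyRange 0 size 1).foldl
      (fun acc i =>
        let ch := PySem.List.pyGetD C i ""   -- C[i]; Python raises when i ≥ len(C) (outside Pre_)
        if pvWordsB.contains ch then acc ++ (pvWordsB.getD ch "").toList.map (fun c => String.mk [c])
        else acc ++ [ch]) []
  out ++ C.drop out.length   -- C[:len(out)] = out (the in-place write-back; its returned value)

-- ===== PRECONDITION & SPEC =====
-- expanded length of one element (word lengths of the four punctuation marks, else 1)
def pvExp1Len (s : String) : Nat :=
  if "," = s then 5 else if "?" = s then 13 else if "." = s then 3 else if "!" = s then 16 else 1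

-- Pre_ excludes: size > len(C) (A raises IndexError reading C[size-1]); and inputs whose expanded
-- text is longer than C (the EPI task presumes the array has slack for the result — there A's
-- right-to-left slice writes raise IndexError or clamp and silently drop characters).
def Pre_telex_encoding (size : Int) (C : List String) : Prop :=
  size ≤ (C.length : Int) ∧ ((C.take size.toNat).map pvExp1Len).sum ≤ C.length

instance (size : Int) (C : List String) : Decidable (Pre_telex_encoding size C) := by
  unfold Pre_telex_encoding; infer_instance

def pvWitness_telex_encoding : Int × List String := (2, ["a", ".", "x", "x", "x"])

def Spec_telex_encoding (size : Int) (C : List String) (out : List String) : Prop :=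
  out = telex_encoding_alt size C
instance (size : Int) (C : List String) (out : List String) : Decidable (Spec_telex_encoding size C out) := by
  unfold Spec_telex_encoding; infer_instance

-- ===== CLAIM (what is proved, stated in full; the proofs are below) =====
def Claim_equal_telex_encoding : Prop :=
  ∀ (size : Int) (C : List String), Dom_telex_encoding size C → Pre_telex_encoding size C →
    Spec_telex_encoding size C (telex_encoding size C)

-- ===== LEMMAS AND PROOFS =====

-- expansion of one element / of a list (the common value both sides compute)
def pvExp1 (s : String) : List String :=
  if "," = s then pvStrChars "COMMA"
  else if "?" = s then pvStrChars "QUESTION MARK"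
  else if "." = s then pvStrChars "DOT"
  else if "!" = s then pvStrChars "EXCLAMATION MARK"
  else [s]

def pvExpand (l : List String) : List String := l.flatMap pvExp1

theorem pvPunctA_mk : pvPunctA = PySem.Dict.mk [(",", "COMMA"), ("?", "QUESTION MARK"), (".", "DOT"), ("!", "EXCLAMATION MARK")] := by decide
theorem pvWordsB_eq : pvWordsB = pvPunctA := by decide

theorem pvPunctA_get? (s : String) :
    pvPunctA.get? s = if "," = s then some "COMMA" else if "?" = s then some "QUESTION MARK"
      else if "." = s then some "DOT" else if "!" = s then some "EXCLAMATION MARK" else none := by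
  rw [pvPunctA_mk]
  simp only [PySem.Dict.get?_mk_cons, beq_iff_eq]
  split_ifs <;> rfl

theorem pvExp1_of_get?_some {s w : String} (h : pvPunctA.get? s = some w) :
    pvExp1 s = pvStrChars w := by
  rw [pvPunctA_get?] at h
  unfold pvExp1
  split_ifs at h ⊢ <;> simp_all

theorem pvExp1_of_get?_none {s : String} (h : pvPunctA.get? s = none) : pvExp1 s = [s] := by
  rw [pvPunctA_get?] at h
  unfold pvExp1
  split_ifs at h ⊢ <;> simp_all

theorem pvExp1Len_eq (s : String) : (pvExp1 s).length = pvExp1Len s := by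
  unfold pvExp1 pvExp1Len pvStrChars
  split_ifs <;> rfl

theorem pvExp1_len_pos (s : String) : 1 ≤ (pvExp1 s).length := by
  unfold pvExp1 pvStrChars
  split_ifs <;> simp

theorem pvGetD_of_get?_some {s w : String} (h : pvPunctA.get? s = some w) :
    pvPunctA.getD s "" = w := by
  rw [PySem.Dict.getD_eq_get?_getD, h]
  rfl

theorem pvStrLen_of_get?_some {s w : String} (h : pvPunctA.get? s = some w) :
    PySem.Str.len w = ((pvExp1 s).length : Int) := by
  rw [pvExp1_of_get?_some h]
  simp [PySem.Str.len_eq, pvStrChars]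

theorem pvExpand_append (l₁ l₂ : List String) :
    pvExpand (l₁ ++ l₂) = pvExpand l₁ ++ pvExpand l₂ := by
  simp [pvExpand]

theorem pvExpand_singleton (s : String) : pvExpand [s] = pvExp1 s := by
  simp [pvExpand]

theorem pvExpand_len_ge (l : List String) : l.length ≤ (pvExpand l).length := by
  induction l with
  | nil => simp [pvExpand]
  | cons x xs ih =>
    have hx := pvExp1_len_pos x
    simp only [pvExpand, List.flatMap_cons, List.length_append, List.length_cons] at *
    omega

-- A's counting pass computes the expanded length
theorem pvCount_eq (l : List String) (acc : Int) :
    l.foldl (fun acc i =>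
        if pvPunctA.contains i then acc + PySem.Str.len (pvPunctA.getD i "") else acc + 1) acc
      = acc + ((pvExpand l).length : Int) := by
  induction l generalizing acc with
  | nil => simp [pvExpand]
  | cons x xs ih =>
    simp only [List.foldl_cons, ih]
    rw [PySem.Dict.contains_eq_isSome_get?]
    rcases h : pvPunctA.get? x with _ | w
    · have he := pvExp1_of_get?_none h
      simp only [Option.isSome_none, Bool.false_eq_true, if_false]
      simp only [pvExpand, List.flatMap_cons, List.length_append, he, List.length_cons,
        List.length_nil]
      push_cast
      ring
    · rw [pvGetD_of_get?_some h, pvStrLen_of_get?_some h]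
      simp only [Option.isSome_some, if_true]
      simp only [pvExpand, List.flatMap_cons, List.length_append]
      push_cast
      ring

-- one step of B's building loop appends the expansion of the element read
theorem pvStepB (acc : List String) (x : String) :
    (if pvWordsB.contains x then acc ++ (pvWordsB.getD x "").toList.map (fun c => String.mk [c])
      else acc ++ [x]) = acc ++ pvExp1 x := by
  rw [pvWordsB_eq, PySem.Dict.contains_eq_isSome_get?]
  rcases h : pvPunctA.get? x with _ | w
  · rw [pvExp1_of_get?_none h]
    simp
  · rw [pvGetD_of_get?_some h, pvExp1_of_get?_some h]
    simp [pvStrChars]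

-- B's building pass computes the expansion of the first m elements
theorem pvOutRange_eq (C : List String) : ∀ (m : Nat), m ≤ C.length →
    (List.range m).foldl (fun acc j =>
        let ch := C.getD j ""
        if pvWordsB.contains ch then acc ++ (pvWordsB.getD ch "").toList.map (fun c => String.mk [c])
        else acc ++ [ch]) [] = pvExpand (C.take m) := by
  intro m
  induction m with
  | zero =>
    intro _
    simp [pvExpand]
  | succ m ihm =>
    intro hm
    rw [List.range_succ, List.foldl_append]
    simp only [List.foldl_cons, List.foldl_nil]
    rw [ihm (by omega)]
    have hx : C.getD m "" = C[m]'(by omega) := List.getD_eq_getElem _ _ (by omega)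
    have ht : C.take (m + 1) = C.take m ++ [C.getD m ""] := by
      rw [List.take_add_one, List.getElem?_eq_getElem (show m < C.length by omega), hx]
      rfl
    rw [pvStepB, ht, pvExpand_append, pvExpand_singleton]

theorem pvSliceAssignA_spec (l r : List String) (a b : Nat) (hab : a ≤ b) (hbn : b ≤ l.length) :
    pvSliceAssignA l (a : Int) (b : Int) r = l.take a ++ r ++ l.drop b := by
  unfold pvSliceAssignA
  dsimp only
  have h1 : ((min (max (a : Int) 0) ((l.length : Nat) : Int))).toNat = a := by omega
  rw [h1]
  have h2 : max ((min (max (b : Int) 0) ((l.length : Nat) : Int))).toNat a = b := by omega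
  rw [h2]

-- the loop invariant: with the suffix already expanded in place, the loop expands the prefix
theorem pvLoopA_inv (C : List String) (sz : Nat) (hsz : sz ≤ C.length)
    (hF : (pvExpand (C.take sz)).length ≤ C.length) :
    ∀ i, i ≤ sz →
      pvLoopA i
        (C.take (pvExpand ((C.take sz).take i)).length
          ++ pvExpand ((C.take sz).drop i)
          ++ C.drop (pvExpand (C.take sz)).length)
        ((pvExpand ((C.take sz).take i)).length - 1)
      = pvExpand (C.take sz) ++ C.drop (pvExpand (C.take sz)).length := by
  intro i
  induction i with
  | zero =>
    intro _
    simp [pvLoopA, pvExpand]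
  | succ i ih =>
    intro hi
    set pre := C.take sz with hpre
    have hprelen : pre.length = sz := by simp [hpre]; omega
    have hilt : i < pre.length := by omega
    set c := pre.getD i "" with hc
    have hcg : pre[i] = c := by rw [hc, List.getD_eq_getElem _ _ hilt]
    have htake : pre.take (i + 1) = pre.take i ++ [c] := by
      rw [List.take_add_one, List.getElem?_eq_getElem hilt, hcg]
      rfl
    have hdrop : pre.drop i = c :: pre.drop (i + 1) := by
      rw [List.drop_eq_getElem_cons hilt, hcg]
    set F := (pvExpand pre).length with hFdef
    set Pi := (pvExpand (pre.take i)).length with hPi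
    set k := (pvExp1 c).length with hk
    have hexpc : (pvExpand [c]).length = k := by
      rw [pvExpand_singleton]
    have hPsucc : (pvExpand (pre.take (i + 1))).length = Pi + k := by
      rw [htake, pvExpand_append, List.length_append, hexpc]
    have hk1 : 1 ≤ k := pvExp1_len_pos c
    have hsplit : pvExpand pre = pvExpand (pre.take (i + 1)) ++ pvExpand (pre.drop (i + 1)) := by
      rw [← pvExpand_append, List.take_append_drop]
    have hPF : Pi + k ≤ F := by
      rw [hFdef, hsplit, List.length_append, hPsucc]
      omega
    have hiP : i < Pi + k := by
      have h1 := pvExpand_len_ge (pre.take (i + 1))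
      have h2 : (pre.take (i + 1)).length = i + 1 := by
        rw [List.length_take]
        omega
      omega
    rw [hPsucc]
    set lst := C.take (Pi + k) ++ pvExpand (pre.drop (i + 1)) ++ C.drop F with hlst
    have hlenTake : (C.take (Pi + k)).length = Pi + k := by
      rw [List.length_take]
      omega
    have hmidlen : (pvExpand (pre.drop (i + 1))).length = F - (Pi + k) := by
      rw [hFdef, hsplit, List.length_append, hPsucc]
      omega
    have hlstlen : lst.length = C.length := by
      rw [hlst]
      simp only [List.length_append]
      rw [hlenTake, hmidlen, List.length_drop]
      omega
    -- the loop reads the original element c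
    have hread : PySem.List.pyGetD lst (i : Int) "" = c := by
      rw [PySem.List.pyGetD_natCast]
      have hidx : lst.getD i "" = (C.take (Pi + k)).getD i "" := by
        rw [hlst, List.append_assoc]
        rw [List.getD_append _ _ _ _ (by omega)]
      rw [hidx, List.getD_eq_getElem _ _ (by omega), List.getElem_take]
      rw [hc, hpre, List.getD_eq_getElem _ _ (by rw [List.length_take]; omega), List.getElem_take]
    -- the state after the write, common to both branches
    have hstate :
        lst.take Pi ++ pvExp1 c ++ lst.drop (Pi + k)
          = C.take Pi ++ pvExpand (pre.drop i) ++ C.drop F := by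
      have h1 : lst.take Pi = C.take Pi := by
        rw [hlst, List.append_assoc, List.take_append_of_le_length (by omega),
          List.take_take, min_eq_left (by omega)]
      have h3 : ∀ (L M : List String), L.length = Pi + k → (L ++ M).drop (Pi + k) = M := by
        intro L M hL
        rw [← hL, List.drop_left]
      have h2 : lst.drop (Pi + k) = pvExpand (pre.drop (i + 1)) ++ C.drop F := by
        rw [hlst, List.append_assoc]
        exact h3 _ _ hlenTake
      rw [h1, h2, hdrop]
      simp [pvExpand, List.append_assoc]
    have hcast : (((Pi + k : Nat) : Int)) - 1 = (Pi : Int) + (k : Int) - 1 := by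
      push_cast
      ring
    rw [hcast]
    simp only [pvLoopA]
    rw [hread]
    rcases hget : pvPunctA.get? c with _ | w
    · -- plain element: single write at index Pi
      dsimp only
      have hkone : k = 1 := by rw [hk, pvExp1_of_get?_none hget]; rfl
      have hw : (Pi : Int) + k - 1 = ((Pi : Nat) : Int) := by rw [hkone]; push_cast; ring
      rw [hw, PySem.List.pySetD_natCast]
      have hset : lst.set Pi c = lst.take Pi ++ pvExp1 c ++ lst.drop (Pi + k) := by
        rw [List.set_eq_take_append_cons_drop, if_pos (by omega), pvExp1_of_get?_none hget, hkone]
        simp [List.append_assoc]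
      rw [hset, hstate]
      have hw2 : ((Pi : Nat) : Int) - 1 = (Pi : Int) - 1 := by push_cast; ring
      rw [hw2]
      exact ih (by omega)
    · -- punctuation: slice write of the word's characters over [Pi, Pi + k)
      dsimp only
      have hlen : PySem.Str.len w = (k : Int) := by rw [pvStrLen_of_get?_some hget, hk]
      have hchars : pvStrChars w = pvExp1 c := (pvExp1_of_get?_some hget).symm
      rw [hlen, hchars]
      have ha : (Pi : Int) + k - 1 - ((k : Int) - 1) = ((Pi : Nat) : Int) := by push_cast; ring
      have hb : (Pi : Int) + k - 1 + 1 = ((Pi + k : Nat) : Int) := by push_cast; ring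
      rw [ha, hb, pvSliceAssignA_spec lst (pvExp1 c) Pi (Pi + k) (by omega) (by omega), hstate]
      have hw3 : (Pi : Int) + k - 1 - (k : Int) = (Pi : Int) - 1 := by ring
      rw [hw3]
      exact ih (by omega)

-- ===== VERDICT (by name: the statement is the Claim_ definition above) =====
theorem telex_encoding_spec : Claim_equal_telex_encoding := by
  intro size C _ hpre
  obtain ⟨hlen, hcap⟩ := hpre
  unfold Spec_telex_encoding telex_encoding telex_encoding_alt
  dsimp only
  rcases Int.lt_or_le size 0 with hneg | h0
  · -- size < 0: A's countdown loop and B's index loop both run zero times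
    have hz : size.toNat = 0 := by omega
    have hr : PySem.List.pyRange 0 size 1 = [] := by
      simp [PySem.List.pyRange]
      omega
    rw [hz, hr]
    simp [pvLoopA]
  · have hslice : PySem.List.slice C none (some size) = C.take size.toNat :=
      PySem.List.slice_to C h0
    rw [hslice, pvCount_eq]
    have hszle : size.toNat ≤ C.length := by omega
    have hrange : PySem.List.pyRange 0 size 1 = List.map (fun (k : Nat) => (k : Int)) (List.range size.toNat) := by
      rw [show size = ((size.toNat : Nat) : Int) by omega]
      exact PySem.List.pyRange_zero_natCast size.toNat
    rw [hrange, List.foldl_map]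
    simp only [PySem.List.pyGetD_natCast]
    rw [pvOutRange_eq C size.toNat hszle]
    have hcap' : (pvExpand (C.take size.toNat)).length ≤ C.length := by
      have hmap : List.map pvExp1Len (C.take size.toNat)
          = List.map (fun a => (pvExp1 a).length) (C.take size.toNat) :=
        List.map_congr_left fun s _ => (pvExp1Len_eq s).symm
      have hlf : (pvExpand (C.take size.toNat)).length
          = (List.map pvExp1Len (C.take size.toNat)).sum := by
        rw [pvExpand, List.length_flatMap, hmap]
      omega
    have hinit := pvLoopA_inv C size.toNat hszle hcap' size.toNat (le_refl _)
    have hps : (C.take size.toNat).take size.toNat = C.take size.toNat := by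
      rw [List.take_take, min_self]
    have hds : (C.take size.toNat).drop size.toNat = [] := by
      rw [List.drop_eq_nil_iff, List.length_take]
      omega
    rw [hps, hds] at hinit
    simp only [pvExpand, List.flatMap_nil, List.append_nil] at hinit
    rw [List.take_append_drop] at hinit
    rw [← pvExpand] at hinit
    have hz : (0 : Int) + ((pvExpand (C.take size.toNat)).length : Int) - 1
        = ((pvExpand (C.take size.toNat)).length : Int) - 1 := by ring
    rw [hz]
    exact hinit
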